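-- pv_equiv track=rewrite | github.com/merlijnvb/8QA05 | FASE 3/rest/Fase 3 dictionarys + tellen.py | get_same_descriptions
-- ===== SOURCE A (Python) =====
-- def get_same_descriptions(lib_cluster_info):
--     clusters = list(lib_cluster_info.keys())
--     same_descriptions = {}
--     for cluster in clusters:
--         descriptions = list(lib_cluster_info[cluster])
--         multiple_desc = {}
--         for description in descriptions:
--             duplicates = any(descriptions.count(description) > 1 for element in descriptions)
--             if duplicates == True:
--                 multiple_desc[description] = descriptions.count(description)
--         same_descriptions[cluster] = multiple_desc
--
--     return same_descriptions
-- ===== SOURCE B (Python) =====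
-- def get_same_descriptions(lib_cluster_info):
--     same_descriptions = {}
--     for cluster, descriptions in lib_cluster_info.items():
--         counts = {}
--         for description in descriptions:
--             counts[description] = counts.get(description, 0) + 1
--         same_descriptions[cluster] = {d: c for d, c in counts.items() if c > 1}
--     return same_descriptions
-- ===== Notes on version B (the rewrite author's own statement) =====
-- stated objective: simpler
-- what changed: Per cluster, B builds a frequency table in one pass and then filters the table's distinct entries by count > 1, instead of A's per-element `.count` rescans wrapped in a redundant `any(...)` scan and repeated dict overwrites.
import Mathlib
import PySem

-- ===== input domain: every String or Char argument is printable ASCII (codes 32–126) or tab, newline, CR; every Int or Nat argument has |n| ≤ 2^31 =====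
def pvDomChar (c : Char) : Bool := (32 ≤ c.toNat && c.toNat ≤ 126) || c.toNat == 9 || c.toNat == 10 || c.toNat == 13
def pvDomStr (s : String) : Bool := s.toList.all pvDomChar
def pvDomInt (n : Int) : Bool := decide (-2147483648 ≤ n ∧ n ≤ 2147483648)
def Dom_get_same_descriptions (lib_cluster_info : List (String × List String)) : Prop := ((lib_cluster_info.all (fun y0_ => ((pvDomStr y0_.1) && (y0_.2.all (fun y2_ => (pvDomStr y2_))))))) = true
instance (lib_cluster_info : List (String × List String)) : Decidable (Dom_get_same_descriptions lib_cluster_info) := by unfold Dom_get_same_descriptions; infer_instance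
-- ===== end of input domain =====

-- B replaces A's per-element `.count`/`any` rescans by one counting pass per cluster and a filter
-- over the distinct keys of that table (objective: a different, simpler inner algorithm).

-- ===== PORT A =====
def get_same_descriptions (lib_cluster_info : List (String × List String)) : List (String × List (String × Int)) :=
  let lib := PySem.Dict.mk lib_cluster_info
  let clusters := PySem.Dict.keys lib
  (clusters.foldl (fun same_descriptions cluster =>
    -- lib_cluster_info[cluster]: the key comes from .keys(), so this lookup never raises
    let descriptions := PySem.Dict.getD lib cluster []
    let multiple_desc := descriptions.foldl (fun multiple_desc description =>
      let duplicates := descriptions.any (fun _element => decide ((PySem.List.count descriptions description : Int) > 1))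
      if duplicates then PySem.Dict.insert multiple_desc description (PySem.List.count descriptions description : Int)
      else multiple_desc) PySem.Dict.empty
    PySem.Dict.insert same_descriptions cluster multiple_desc.items) PySem.Dict.empty).items

-- ===== PORT B =====
def get_same_descriptions_alt (lib_cluster_info : List (String × List String)) : List (String × List (String × Int)) :=
  let lib := PySem.Dict.mk lib_cluster_info
  (lib.items.foldl (fun same_descriptions p =>
    let counts := p.2.foldl (fun counts d => PySem.Dict.insert counts d (PySem.Dict.getD counts d 0 + 1)) PySem.Dict.empty
    let entry := counts.items.foldl (fun e q => if q.2 > 1 then PySem.Dict.insert e q.1 q.2 else e) PySem.Dict.empty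
    PySem.Dict.insert same_descriptions p.1 entry.items) PySem.Dict.empty).items

-- ===== PRECONDITION & SPEC =====
-- The association list stands for a Python dict, whose keys are necessarily distinct; Pre_ states
-- exactly that and excludes no input that corresponds to an actual Python dict.
def Pre_get_same_descriptions (lib_cluster_info : List (String × List String)) : Prop :=
  (lib_cluster_info.map Prod.fst).Nodup
instance (lib_cluster_info : List (String × List String)) : Decidable (Pre_get_same_descriptions lib_cluster_info) := by unfold Pre_get_same_descriptions; infer_instance
def pvWitness_get_same_descriptions : (List (String × List String)) :=
  [("c1", ["x", "y", "x", "x"]), ("c2", ["z"])]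
def Spec_get_same_descriptions (lib_cluster_info : List (String × List String)) (out : List (String × List (String × Int))) : Prop := out = get_same_descriptions_alt lib_cluster_info
instance (lib_cluster_info : List (String × List String)) (out : List (String × List (String × Int))) : Decidable (Spec_get_same_descriptions lib_cluster_info out) := by unfold Spec_get_same_descriptions; infer_instance

-- ===== CLAIM (what is proved, stated in full; the proofs are below) =====
def Claim_equal_get_same_descriptions : Prop := ∀ (lib_cluster_info : List (String × List String)), Dom_get_same_descriptions lib_cluster_info → Pre_get_same_descriptions lib_cluster_info → Spec_get_same_descriptions lib_cluster_info (get_same_descriptions lib_cluster_info)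

-- ===== LEMMAS AND PROOFS =====

def collectA (f : String → Int) (seen : List String) : List String → List (String × Int)
  | [] => []
  | x :: l =>
      if x ∈ seen then collectA f seen l
      else (if f x > 1 then [(x, f x)] else []) ++ collectA f (x :: seen) l


theorem collectA_congr (f : String → Int) : ∀ (l s₁ s₂ : List String),
    (∀ k, k ∈ s₁ ↔ k ∈ s₂) → collectA f s₁ l = collectA f s₂ l := by
  intro l
  induction l with
  | nil => intro _ _ _; rfl
  | cons x l ih =>
    intro s₁ s₂ h
    simp only [collectA]
    by_cases hx : x ∈ s₁
    · rw [if_pos hx, if_pos ((h x).mp hx), ih _ _ h]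
    · rw [if_neg hx, if_neg (fun hc => hx ((h x).mpr hc))]
      rw [ih (x :: s₁) (x :: s₂) (by intro k; simp [h k])]

theorem foldB_items : ∀ (ps : List (String × Int)) (acc : PySem.Dict String Int),
    (ps.map Prod.fst).Nodup → (∀ p ∈ ps, acc.contains p.1 = false) →
    (ps.foldl (fun e q => if q.2 > 1 then PySem.Dict.insert e q.1 q.2 else e) acc).items
      = acc.items ++ ps.filter (fun q => decide (q.2 > 1)) := by
  intro ps
  induction ps with
  | nil => intro acc _ _; simp
  | cons q ps ih =>
    intro acc hnd hfresh
    simp only [List.map_cons, List.nodup_cons] at hnd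
    have hq : acc.contains q.1 = false := hfresh q (List.mem_cons_self ..)
    have hfresh' : ∀ (d : PySem.Dict String Int), d.contains q.1 = false → True := fun _ _ => trivial
    by_cases h1 : q.2 > 1
    · simp only [List.foldl_cons, if_pos h1]
      rw [ih _ hnd.2 ?_]
      · rw [PySem.Dict.items_insert_of_not_contains _ _ hq]
        simp [h1]
      · intro p hp
        rw [PySem.Dict.contains_insert]
        have : p.1 ≠ q.1 := by
          intro he; exact hnd.1 (he ▸ List.mem_map_of_mem hp)
        simp [this, hfresh p (List.mem_cons_of_mem _ hp)]
    · simp only [List.foldl_cons, if_neg h1]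
      rw [ih _ hnd.2 (fun p hp => hfresh p (List.mem_cons_of_mem _ hp))]
      simp [h1]

theorem collectA_eq_filter (f : String → Int) : ∀ (l seen : List String),
    ((PySem.Set.update seen l).filter (fun k => decide (f k > 1))).map (fun k => (k, f k))
      = (seen.filter (fun k => decide (f k > 1))).map (fun k => (k, f k)) ++ collectA f seen l := by
  intro l
  induction l with
  | nil => intro seen; simp [PySem.Set.update, collectA]
  | cons x l ih =>
    intro seen
    have hupd : PySem.Set.update seen (x :: l) = PySem.Set.update (PySem.Set.add seen x) l := by
      simp [PySem.Set.update]
    by_cases hx : x ∈ seen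
    · have hadd : PySem.Set.add seen x = seen := by
        simp [PySem.Set.add, PySem.Set.contains, hx]
      rw [hupd, hadd, ih, collectA]
      simp [hx]
    · have hadd : PySem.Set.add seen x = seen ++ [x] := by
        simp [PySem.Set.add, PySem.Set.contains, hx]
      rw [hupd, hadd, ih]
      rw [show collectA f (seen ++ [x]) l = collectA f (x :: seen) l from
        collectA_congr f l _ _ (by intro k; simp [or_comm])]
      simp only [collectA, if_neg hx]
      by_cases h1 : f x > 1 <;> simp [List.filter_append, h1]

theorem foldA_items (f : String → Int) : ∀ (l : List String) (acc : PySem.Dict String Int) (seen : List String),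
    acc.keys.Nodup → (∀ p ∈ acc.items, p.2 = f p.1) → (∀ k, k ∈ acc.keys ↔ (k ∈ seen ∧ f k > 1)) →
    (l.foldl (fun md x => if f x > 1 then PySem.Dict.insert md x (f x) else md) acc).items
      = acc.items ++ collectA f seen l := by
  intro l
  induction l with
  | nil => intro acc seen _ _ _; simp [collectA]
  | cons x l ih =>
    intro acc seen hnd hval hinv
    simp only [List.foldl_cons, collectA]
    by_cases h1 : f x > 1
    · rw [if_pos h1]
      by_cases hx : x ∈ seen
      · -- x already among keys, overwrite with the same value: dict unchanged
        have hk : x ∈ acc.keys := (hinv x).mpr ⟨hx, h1⟩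
        have hc : acc.contains x = true := (PySem.Dict.contains_iff_mem_keys acc x).mpr hk
        have heq : PySem.Dict.insert acc x (f x) = acc := by
          apply PySem.Dict.ext
          rw [PySem.Dict.items_insert_of_contains _ _ hc]
          have hmap : ∀ p ∈ acc.items,
              (fun p : String × Int => if (p.1 == x) = true then (x, f x) else p) p = id p := by
            intro p hp
            have hv := hval p hp
            by_cases hpx : p.1 = x
            · simp only [hpx, beq_self_eq_true, if_pos, id]
              rw [show (x, f x) = (p.1, p.2) by rw [hpx, hv, hpx]]
            · simp [hpx]
          rw [List.map_congr_left hmap, List.map_id]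
        rw [heq, if_pos hx, ih acc seen hnd hval hinv]
      · -- fresh key: append
        have hk : x ∉ acc.keys := fun h => hx ((hinv x).mp h).1
        have hc : acc.contains x = false := by
          rw [← Bool.not_eq_true, PySem.Dict.contains_iff_mem_keys]; exact hk
        rw [if_neg hx, ih (PySem.Dict.insert acc x (f x)) (x :: seen) ?_ ?_ ?_]
        · rw [PySem.Dict.items_insert_of_not_contains _ _ hc]
          simp [h1]
        · rw [PySem.Dict.keys_insert_of_not_contains _ _ hc]
          simp only [List.nodup_append, List.nodup_singleton, true_and]
          refine ⟨hnd, ?_⟩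
          intro a ha b hb
          simp only [List.mem_singleton] at hb
          subst hb
          exact fun he => hk (he ▸ ha)
        · intro p hp
          rw [PySem.Dict.items_insert_of_not_contains _ _ hc] at hp
          rcases List.mem_append.mp hp with h | h
          · exact hval p h
          · simp at h; simp [h]
        · intro k
          rw [PySem.Dict.keys_insert_of_not_contains _ _ hc]
          constructor
          · intro h
            rcases List.mem_append.mp h with h | h
            · rcases (hinv k).mp h with ⟨hs, hf⟩
              exact ⟨List.mem_cons_of_mem _ hs, hf⟩
            · simp at h; subst h; exact ⟨List.mem_cons_self .., h1⟩
          · rintro ⟨hs, hf⟩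
            rcases List.mem_cons.mp hs with h | h
            · subst h; simp
            · exact List.mem_append.mpr (.inl ((hinv k).mpr ⟨h, hf⟩))
    · rw [if_neg h1]
      by_cases hx : x ∈ seen
      · rw [if_pos hx, ih acc seen hnd hval hinv]
      · rw [if_neg hx, if_neg h1]
        simp only [List.nil_append]
        refine ih acc (x :: seen) hnd hval ?_
        intro k
        rw [hinv k]
        constructor
        · rintro ⟨hs, hf⟩; exact ⟨List.mem_cons_of_mem _ hs, hf⟩
        · rintro ⟨hs, hf⟩
          rcases List.mem_cons.mp hs with h | h
          · subst h; exact absurd hf h1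
          · exact ⟨h, hf⟩

theorem inner_eq (l : List String) :
    (l.foldl (fun md x =>
        let duplicates := l.any (fun _element => decide ((PySem.List.count l x : Int) > 1))
        if duplicates then PySem.Dict.insert md x (PySem.List.count l x : Int) else md)
      PySem.Dict.empty).items
    = ((PySem.Dict.counter l : PySem.Dict String Int).items.foldl
        (fun e q => if q.2 > 1 then PySem.Dict.insert e q.1 q.2 else e) PySem.Dict.empty).items := by
  have hstep : (l.foldl (fun md x =>
        let duplicates := l.any (fun _element => decide ((PySem.List.count l x : Int) > 1))
        if duplicates then PySem.Dict.insert md x (PySem.List.count l x : Int) else md)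
      PySem.Dict.empty)
      = l.foldl (fun md x => if ((PySem.List.count l x : Int) > 1) then
          PySem.Dict.insert md x (PySem.List.count l x : Int) else md) PySem.Dict.empty := by
    apply PySem.List.foldl_congr_mem
    intro md x hx
    simp only []
    by_cases hb : ((PySem.List.count l x : Int) > 1)
    · refine (if_pos (List.any_eq_true.mpr ⟨x, hx, ?_⟩)).trans (if_pos hb).symm
      simp only [decide_eq_true_eq]
      exact_mod_cast hb
    · refine (if_neg ?_).trans (if_neg hb).symm
      simp only [List.any_eq_true, decide_eq_true_eq, not_exists, not_and]
      intro y _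
      exact_mod_cast hb
  rw [hstep]
  rw [foldA_items (fun s => (PySem.List.count l s : Int)) l PySem.Dict.empty []
    (by rw [PySem.Dict.keys_empty]; exact List.nodup_nil)
    (by intro p hp; simp [PySem.Dict.empty] at hp)
    (by intro k; rw [PySem.Dict.keys_empty]; simp)]
  rw [PySem.Dict.items_counter]
  have hnd : (List.map Prod.fst (List.map (fun k => (k, (List.count k l : Int))) (PySem.Set.ofList l))).Nodup := by
    rw [List.map_map]
    have : (Prod.fst ∘ fun k : String => (k, (List.count k l : Int))) = id := by funext k; rfl
    rw [this, List.map_id]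
    exact PySem.Set.nodup_ofList l
  rw [foldB_items _ _ hnd (fun p _ => PySem.Dict.contains_empty _)]
  rw [List.filter_map]
  have : ((fun q : String × Int => decide (q.2 > 1)) ∘ fun k => (k, (List.count k l : Int)))
       = fun k => decide ((PySem.List.count l k : Int) > 1) := by
    funext k; simp [PySem.List.count_eq]
  rw [this]
  have hmapfn : (fun k => (k, (List.count k l : Int)))
      = fun k => (k, (PySem.List.count l k : Int)) := by
    funext k; simp [PySem.List.count_eq]
  rw [hmapfn]
  have := collectA_eq_filter (fun s => (PySem.List.count l s : Int)) l []
  simp only [List.filter_nil, List.map_nil, List.nil_append] at this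
  rw [show PySem.Set.ofList l = PySem.Set.update [] l from rfl, this]



theorem ports_agree (lib : List (String × List String)) (hpre : (lib.map Prod.fst).Nodup) :
    get_same_descriptions lib = get_same_descriptions_alt lib := by
  unfold get_same_descriptions get_same_descriptions_alt
  simp only []
  have hitems : (PySem.Dict.mk lib).items = lib := rfl
  have hkeys : (PySem.Dict.mk lib).keys = lib.map Prod.fst := rfl
  rw [hkeys]
  rw [PySem.Dict.items_foldl_insert_fresh (lib.map Prod.fst) (fun c => c) _
    PySem.Dict.empty (fun a _ => PySem.Dict.contains_empty _) (by simpa using hpre)]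
  rw [PySem.Dict.items_foldl_insert_fresh lib Prod.fst _
    PySem.Dict.empty (fun a _ => PySem.Dict.contains_empty _) hpre]
  rw [List.map_map]
  apply congrArg (PySem.Dict.empty.items ++ ·)
  apply List.map_congr_left
  intro p hp
  simp only [Function.comp]
  have hget : PySem.Dict.getD (PySem.Dict.mk lib) p.1 [] = p.2 := by
    apply PySem.Dict.getD_of_mem_items
    · rw [hitems]; exact (by simpa using hp)
    · rw [hkeys]; exact hpre
  rw [hget]
  rw [PySem.Dict.foldl_insert_getD_add_one_eq_counter]
  exact congrArg (Prod.mk p.1) (inner_eq p.2)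

-- ===== VERDICT (by name: the statement is the Claim_ definition above) =====
theorem get_same_descriptions_spec : Claim_equal_get_same_descriptions := by
  intro lib _ hpre
  unfold Spec_get_same_descriptions
  exact ports_agree lib hpre
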